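-- pv_equiv track=rewrite | github.com/chema74/Agentes_IA | proyectos/p02-agente-multi-herramienta/domain/document_processor.py | buscar_contexto_relevante
-- ===== SOURCE A (Python) =====
-- def buscar_contexto_relevante(query: str, chunks: list[str], max_chunks: int = 3) -> str:
--     """
--     Busca los fragmentos más relevantes para una pregunta.
--     Implementa un filtrado básico por palabras clave antes de enviar al LLM.
--     """
--     if not chunks:
--         return "No hay contenido disponible en el documento."
--
--     # [Inferencia] Filtrado por relevancia simple (palabras clave en común)
--     palabras_query = set(query.lower().split())
--
--     # Puntuamos cada fragmento según cuántas palabras de la pregunta contiene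
--     fragmentos_puntuados = []
--     for c in chunks:
--         puntos = sum(1 for p in palabras_query if p in c.lower())
--         fragmentos_puntuados.append((puntos, c))
--
--     # Ordenamos por relevancia y tomamos los mejores
--     fragmentos_puntuados.sort(key=lambda x: x[0], reverse=True)
--     mejores_fragmentos = [f[1] for f in fragmentos_puntuados[:max_chunks]]
--
--     return "\n\n---\n\n".join(mejores_fragmentos)
-- ===== SOURCE B (Python) =====
-- def buscar_contexto_relevante(query: str, chunks: list[str], max_chunks: int = 3) -> str:
--     """Sort-free: score each chunk once, then emit score levels from highest to
--     lowest by filtering, which reproduces the stable descending order."""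
--     if not chunks:
--         return "No hay contenido disponible en el documento."
--
--     palabras = set(query.lower().split())
--     pares = [(sum(p in c.lower() for p in palabras), c) for c in chunks]
--     ordenados = [c for s in reversed(range(len(palabras) + 1))
--                    for (sc, c) in pares if sc == s]
--     return "\n\n---\n\n".join(ordenados[:max_chunks])
-- ===== Notes on version B (the rewrite author's own statement) =====
-- stated objective: alternative
-- what changed: B never sorts: it scores each chunk once into (score, chunk) pairs via a comprehension, then builds the ordered list by one filtering pass per score level from len(palabras) down to 0 (stable within a level), replacing A's stable reverse sort; slice and join unchanged.
import Mathlib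
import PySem

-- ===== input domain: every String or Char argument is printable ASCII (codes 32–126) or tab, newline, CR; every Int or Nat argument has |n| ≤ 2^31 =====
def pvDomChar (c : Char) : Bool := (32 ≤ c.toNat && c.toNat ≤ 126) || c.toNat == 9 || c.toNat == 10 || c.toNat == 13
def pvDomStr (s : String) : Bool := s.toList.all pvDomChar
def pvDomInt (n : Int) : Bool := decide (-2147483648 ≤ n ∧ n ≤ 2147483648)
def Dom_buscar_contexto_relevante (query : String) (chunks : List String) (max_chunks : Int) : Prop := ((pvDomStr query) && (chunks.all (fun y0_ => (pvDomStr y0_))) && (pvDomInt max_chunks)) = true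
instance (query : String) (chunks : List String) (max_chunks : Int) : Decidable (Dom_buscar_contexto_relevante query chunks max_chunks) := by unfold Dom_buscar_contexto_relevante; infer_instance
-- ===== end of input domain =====

-- B drops the sort: it scores each chunk once, then emits one filtering pass per score level from high to low (alternative algorithm, same output).

-- ===== PORT A =====
def buscar_contexto_relevante (query : String) (chunks : List String) (max_chunks : Int) : String :=
  if chunks = [] then "No hay contenido disponible en el documento."
  else
    let palabras_query := PySem.Set.ofList (PySem.Str.split₀ (PySem.Str.lower query))
    let fragmentos_puntuados := chunks.foldl (fun acc c =>
      acc ++ [(palabras_query.foldl (fun s p => if PySem.Str.isIn p (PySem.Str.lower c) then s + 1 else s) (0 : Int), c)]) ([] : List (Int × String))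
    let ordenados := PySem.List.sorted fragmentos_puntuados (fun x => x.1) true
    let mejores := (PySem.List.slice ordenados none (some max_chunks)).map (fun f => f.2)
    PySem.Str.join "\n\n---\n\n" mejores

-- ===== PORT B =====
def buscar_contexto_relevante_alt (query : String) (chunks : List String) (max_chunks : Int) : String :=
  if chunks = [] then "No hay contenido disponible en el documento."
  else
    let palabras := PySem.Set.ofList (PySem.Str.split₀ (PySem.Str.lower query))
    let pares := chunks.map (fun c =>
      ((palabras.countP (fun p => PySem.Str.isIn p (PySem.Str.lower c)) : Int), c))
    let ordenados := ((List.range (palabras.length + 1)).reverse).flatMap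
      (fun (s : Nat) => (pares.filter (fun y => decide (y.1 = (s : Int)))).map (fun y => y.2))
    PySem.Str.join "\n\n---\n\n" (PySem.List.slice ordenados none (some max_chunks))

-- ===== PRECONDITION & SPEC =====
def Spec_buscar_contexto_relevante (query : String) (chunks : List String) (max_chunks : Int) (out : String) : Prop := out = buscar_contexto_relevante_alt query chunks max_chunks
instance (query : String) (chunks : List String) (max_chunks : Int) (out : String) : Decidable (Spec_buscar_contexto_relevante query chunks max_chunks out) := by unfold Spec_buscar_contexto_relevante; infer_instance

-- ===== CLAIM (what is proved, stated in full; the proofs are below) =====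
def Claim_equal_buscar_contexto_relevante : Prop := ∀ (query : String) (chunks : List String) (max_chunks : Int), Dom_buscar_contexto_relevante query chunks max_chunks → Spec_buscar_contexto_relevante query chunks max_chunks (buscar_contexto_relevante query chunks max_chunks)

-- ===== LEMMAS AND PROOFS =====

-- score of a chunk: how many distinct query words occur in its lowercased text
def pvScore (P : List String) (c : String) : Int :=
  (P.countP (fun p => PySem.Str.isIn p (PySem.Str.lower c)) : Int)

lemma pv_score_eq (P : List String) (c : String) :
    P.foldl (fun s p => if PySem.Str.isIn p (PySem.Str.lower c) then s + 1 else s) (0 : Int) = pvScore P c := by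
  rw [PySem.List.foldl_if_add_one]; simp [pvScore]

-- buckets read high score to low, flattened
def pvG (n : Nat) (xs : List (Int × String)) : List (Int × String) :=
  ((List.range (n+1)).reverse.map (fun (i : Nat) => xs.filter (fun y => decide (y.1 = (i : Int))))).flatten

lemma pvG_zero (xs : List (Int × String)) : pvG 0 xs = xs.filter (fun y => decide (y.1 = (0 : Int))) := by
  simp [pvG, List.range_succ]

lemma pvG_succ (n : Nat) (xs : List (Int × String)) :
    pvG (n+1) xs = xs.filter (fun y => decide (y.1 = ((n : Int) + 1))) ++ pvG n xs := by
  have hc : (((n+1 : Nat)) : Int) = (n : Int) + 1 := by push_cast; ring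
  simp only [pvG, List.range_succ, List.reverse_append, List.reverse_singleton,
    List.singleton_append, List.map_cons, List.flatten_cons, hc]

lemma pvG_nil (n : Nat) : pvG n [] = [] := by
  induction n with
  | zero => simp [pvG_zero]
  | succ n ih => simp [pvG_succ, ih]

lemma pvG_snoc_high (n : Nat) (x : Int × String) (xs : List (Int × String))
    (h : (n : Int) < x.1) : pvG n (xs ++ [x]) = pvG n xs := by
  induction n with
  | zero =>
      rw [pvG_zero, pvG_zero, List.filter_append]
      have : decide (x.1 = (0 : Int)) = false := by simp; omega
      simp [this]
  | succ n ih =>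
      rw [pvG_succ, pvG_succ, List.filter_append, ih (by push_cast at h ⊢; omega)]
      have : decide (x.1 = ((n : Int) + 1)) = false := by simp; push_cast at h; omega
      simp [this]

lemma pvG_mem (n : Nat) (xs : List (Int × String)) (y : Int × String) (h : y ∈ pvG n xs) :
    0 ≤ y.1 ∧ y.1 ≤ (n : Int) := by
  induction n with
  | zero =>
      rw [pvG_zero] at h
      have := (List.mem_filter.mp h).2
      simp at this
      omega
  | succ n ih =>
      rw [pvG_succ] at h
      rcases List.mem_append.mp h with h1 | h2
      · have := (List.mem_filter.mp h1).2
        simp at this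
        push_cast
        omega
      · have := ih h2
        push_cast
        omega

lemma pv_insertBy_cons {α : Type} (b : α → α → Bool) (x y : α) (ys : List α) :
    PySem.List.insertBy b x (y :: ys) = if b x y then x :: y :: ys else y :: PySem.List.insertBy b x ys := rfl

lemma pv_insertBy_skip {α : Type} (b : α → α → Bool) (x : α) (pre post : List α)
    (h : ∀ y ∈ pre, b x y = false) :
    PySem.List.insertBy b x (pre ++ post) = pre ++ PySem.List.insertBy b x post := by
  induction pre with
  | nil => rfl
  | cons y ys ih =>
      rw [List.cons_append, pv_insertBy_cons, h y (by simp), List.cons_append]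
      simp only [Bool.false_eq_true, if_false]
      rw [ih (fun z hz => h z (by simp [hz]))]

lemma pv_insertBy_front {α : Type} (b : α → α → Bool) (x : α) (post : List α)
    (h : ∀ y ∈ post, b x y = true) :
    PySem.List.insertBy b x post = x :: post := by
  cases post with
  | nil => rfl
  | cons y ys => rw [pv_insertBy_cons, if_pos (h y (by simp))]

lemma pv_ins (n : Nat) (x : Int × String) (xs : List (Int × String))
    (hx0 : 0 ≤ x.1) (hxn : x.1 ≤ (n : Int)) :
    PySem.List.insertBy (fun a b => decide (b.1 < a.1)) x (pvG n xs) = pvG n (xs ++ [x]) := by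
  induction n with
  | zero =>
      have hx : x.1 = 0 := by omega
      rw [pvG_zero, pvG_zero, List.filter_append]
      have h1 : [x].filter (fun y => decide (y.1 = (0 : Int))) = [x] := by simp [hx]
      rw [h1, PySem.List.insertBy_of_forall_not_before]
      intro y hy
      have := (List.mem_filter.mp hy).2
      simp at this ⊢
      omega
  | succ n ih =>
      rw [pvG_succ, pvG_succ]
      have hskipT : ∀ y ∈ xs.filter (fun y => decide (y.1 = ((n : Int) + 1))),
          (fun a b => decide (b.1 < a.1)) x y = false := by
        intro y hy
        have := (List.mem_filter.mp hy).2
        simp at this ⊢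
        push_cast at hxn
        omega
      rw [pv_insertBy_skip _ _ _ _ hskipT]
      by_cases hc : x.1 ≤ (n : Int)
      · rw [ih hc, List.filter_append]
        have h0 : [x].filter (fun y => decide (y.1 = ((n : Int) + 1))) = [] := by
          simp; omega
        rw [h0, List.append_nil]
      · have hx : x.1 = (n : Int) + 1 := by push_cast at hxn; omega
        rw [pv_insertBy_front]
        · rw [List.filter_append, pvG_snoc_high n x xs (by omega)]
          have h1 : [x].filter (fun y => decide (y.1 = ((n : Int) + 1))) = [x] := by simp [hx]
          rw [h1, List.append_assoc, List.singleton_append]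
        · intro y hy
          have := pvG_mem n xs y hy
          simp
          omega

lemma pv_sorted_eq (n : Nat) (xs : List (Int × String))
    (h : ∀ y ∈ xs, 0 ≤ y.1 ∧ y.1 ≤ (n : Int)) :
    PySem.List.sorted xs (fun y => y.1) true = pvG n xs := by
  rw [PySem.List.sorted_rev_eq_foldl_insertBy]
  induction xs using List.reverseRecOn with
  | nil => simp [pvG_nil]
  | append_singleton xs x ih =>
      rw [List.foldl_append, List.foldl_cons, List.foldl_nil,
        ih (fun y hy => h y (by simp [hy]))]
      exact pv_ins n x xs (h x (by simp)).1 (h x (by simp)).2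

lemma pv_map_slice {α β : Type} (L : List α) (g : α → β) (m : Int) :
    (PySem.List.slice L none (some m)).map g = PySem.List.slice (L.map g) none (some m) := by
  by_cases hm : 0 ≤ m
  · rw [PySem.List.slice_to _ hm, PySem.List.slice_to _ hm, List.map_take]
  · have hk : m = -(((-m).toNat : Nat) : Int) := by omega
    have hpos : 0 < (-m).toNat := by omega
    rw [hk, PySem.List.slice_to_neg_natCast _ _ hpos, PySem.List.slice_to_neg_natCast _ _ hpos,
      List.map_take, List.length_map]

-- map-snd of the high→low flattening is B's flatMap of per-level filters
lemma pvG_map_snd (n : Nat) (xs : List (Int × String)) :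
    (pvG n xs).map (fun y => y.2)
    = ((List.range (n+1)).reverse).flatMap
        (fun (s : Nat) => (xs.filter (fun y => decide (y.1 = (s : Int)))).map (fun y => y.2)) := by
  rw [pvG, List.map_flatten, List.map_map, List.flatMap_def]
  simp [Function.comp_def]

-- ===== VERDICT (by name: the statement is the Claim_ definition above) =====
theorem buscar_contexto_relevante_spec : Claim_equal_buscar_contexto_relevante := by
  intro query chunks max_chunks _
  show _ = _
  unfold buscar_contexto_relevante buscar_contexto_relevante_alt
  by_cases h : chunks = []
  · simp [h]
  · simp only [if_neg h, PySem.List.foldl_append_singleton_eq_map, List.nil_append, pv_score_eq]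
    rw [pv_sorted_eq (PySem.Set.ofList (PySem.Str.split₀ (PySem.Str.lower query))).length
        _ (by
          intro y hy
          rcases List.mem_map.mp hy with ⟨c, _, rfl⟩
          dsimp only [pvScore]
          exact ⟨Int.natCast_nonneg _, by exact_mod_cast List.countP_le_length⟩),
        pv_map_slice, pvG_map_snd]
    simp only [pvScore]
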